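-- pv_equiv track=rewrite | github.com/ta5946/alice-rag | src/scraper/mattermost_posts.py | group_consecutive_posts
-- ===== SOURCE A (Python) =====
-- def group_consecutive_posts(posts):
--     grouped_posts = []
--     current_post = None
--
--     for post in posts:
--         if current_post is None or current_post["user_id"] != post["user_id"]:
--             if current_post:
--                 grouped_posts.append(current_post)
--             current_post = post
--         else:
--             current_post["message"] += "\n" + post["message"] # extend message field
--
--     if current_post:
--         grouped_posts.append(current_post)
--     return grouped_posts
-- ===== SOURCE B (Python) =====
-- def group_consecutive_posts(posts):
--     # Phase 1: split the list into maximal runs of consecutive same-user posts.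
--     runs = []
--     for post in posts:
--         if runs and runs[-1][0]["user_id"] == post["user_id"]:
--             runs[-1].append(post)
--         else:
--             runs.append([post])
--     # Phase 2: collapse each run into its first post, joining the messages.
--     merged = []
--     for run in runs:
--         first = run[0]
--         if len(run) > 1:
--             first["message"] = "\n".join(p["message"] for p in run)
--         merged.append(first)
--     return merged
-- ===== Notes on version B (the rewrite author's own statement) =====
-- stated objective: alternative
-- what changed: A's streaming state machine (current-post accumulator merged incrementally with += on each same-user post) is replaced by a two-phase group-then-join: first split the list into maximal same-user runs, then collapse each run to its first post with one \n-join of all messages.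
-- intended difference: On the one-element input whose only post is an empty dict, A's 'if current_post:' truthiness test (meant as a None check) silently drops the post and returns an empty list, while B keeps the post and returns a one-element list holding the empty dict, which is the intended value since grouping should never discard a post. — e.g. on group_consecutive_posts([[]]): A returns [], B returns [[]]
import Mathlib
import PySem

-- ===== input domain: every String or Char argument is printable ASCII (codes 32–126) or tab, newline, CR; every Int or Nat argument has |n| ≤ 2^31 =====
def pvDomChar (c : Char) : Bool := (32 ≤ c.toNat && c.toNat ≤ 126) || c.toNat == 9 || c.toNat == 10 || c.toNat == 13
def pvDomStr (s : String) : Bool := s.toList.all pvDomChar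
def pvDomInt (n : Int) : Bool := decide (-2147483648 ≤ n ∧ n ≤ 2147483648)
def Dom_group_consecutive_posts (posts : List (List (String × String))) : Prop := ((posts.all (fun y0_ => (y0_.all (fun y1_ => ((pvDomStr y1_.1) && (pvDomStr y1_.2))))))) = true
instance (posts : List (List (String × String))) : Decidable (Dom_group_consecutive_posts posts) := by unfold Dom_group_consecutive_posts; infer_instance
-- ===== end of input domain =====

-- B replaces A's streaming current-post merge by a two-phase group-runs-then-join decomposition
-- (alternative, same cost); both A and B mutate the first post of each multi-post run in place
-- (the equivalence proved here is about the returned value).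

-- ===== PORT A =====
-- A's loop state: (grouped_posts, current_post); dicts are PySem.Dict built from the assoc lists.
def pvStepA (st : List (PySem.Dict String String) × Option (PySem.Dict String String))
    (raw : List (String × String)) :
    List (PySem.Dict String String) × Option (PySem.Dict String String) :=
  let post := PySem.Dict.ofList raw
  match st.2 with
  | none => (st.1, some post)
  | some c =>
    if c.getD "user_id" "" ≠ post.getD "user_id" "" then
      ((if c.items.isEmpty then st.1 else st.1 ++ [c]), some post)
    else
      (st.1, some (c.insert "message" (c.getD "message" "" ++ "\n" ++ post.getD "message" "")))

def group_consecutive_posts (posts : List (List (String × String))) : List (List (String × String)) :=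
  (match posts.foldl pvStepA ([], none) with
   | (g, none) => g
   | (g, some c) => if c.items.isEmpty then g else g ++ [c]).map PySem.Dict.items

-- ===== PORT B =====
-- phase 1: 'if runs and runs[-1][0]["user_id"] == post["user_id"]: runs[-1].append(post) else: runs.append([post])'
def pvStepB (runs : List (List (PySem.Dict String String))) (raw : List (String × String)) :
    List (List (PySem.Dict String String)) :=
  let post := PySem.Dict.ofList raw
  match runs.getLast? with
  | some r =>
    if (r.headD PySem.Dict.empty).getD "user_id" "" = post.getD "user_id" "" then
      runs.dropLast ++ [r ++ [post]]
    else
      runs ++ [[post]]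
  | none => runs ++ [[post]]

-- phase 2: first = run[0]; if len(run) > 1: first["message"] = "\n".join(p["message"] for p in run)
def pvFinishRun (run : List (PySem.Dict String String)) : PySem.Dict String String :=
  let first := run.headD PySem.Dict.empty
  if 1 < run.length then
    first.insert "message" (PySem.Str.join "\n" (run.map (fun p => p.getD "message" "")))
  else first

def group_consecutive_posts_alt (posts : List (List (String × String))) : List (List (String × String)) :=
  ((posts.foldl pvStepB []).foldl (fun acc run => acc ++ [pvFinishRun run]) []).map PySem.Dict.items

-- ===== PRECONDITION & SPEC =====
-- Pre_ excludes exactly the inputs on which A raises KeyError: a list of length ≥ 2 with a post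
-- lacking a "user_id" key, or same-user adjacent posts one of which lacks a "message" key.
def pvAdjOK : List (List (String × String)) → Bool
  | p :: q :: rest =>
    (if (PySem.Dict.ofList p).getD "user_id" "" = (PySem.Dict.ofList q).getD "user_id" "" then
      (PySem.Dict.ofList p).contains "message" && (PySem.Dict.ofList q).contains "message"
    else true) && pvAdjOK (q :: rest)
  | _ => true

def Pre_group_consecutive_posts (posts : List (List (String × String))) : Prop :=
  (2 ≤ posts.length → ∀ p ∈ posts, (PySem.Dict.ofList p).contains "user_id" = true) ∧
  pvAdjOK posts = true
instance (posts : List (List (String × String))) : Decidable (Pre_group_consecutive_posts posts) := by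
  unfold Pre_group_consecutive_posts; infer_instance

def pvWitness_group_consecutive_posts : (List (List (String × String))) :=
  [[("user_id", "a"), ("message", "hi")],
   [("user_id", "a"), ("message", "there")],
   [("user_id", "b"), ("message", "x")]]

-- On the one-element input whose only post is an empty dict, A's 'if current_post:' truthiness
-- test (meant as a None check) silently drops the post and returns an empty list, while B keeps the
-- post and returns a one-element list holding the empty dict, which is the intended value since
-- grouping should never discard a post.
def D_group_consecutive_posts (posts : List (List (String × String))) : Prop :=
  posts = [[]]
instance (posts : List (List (String × String))) : Decidable (D_group_consecutive_posts posts) := by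
  unfold D_group_consecutive_posts; infer_instance

def Spec_group_consecutive_posts (posts : List (List (String × String))) (out : List (List (String × String))) : Prop := ¬ D_group_consecutive_posts posts → out = group_consecutive_posts_alt posts
instance (posts : List (List (String × String))) (out : List (List (String × String))) : Decidable (Spec_group_consecutive_posts posts out) := by unfold Spec_group_consecutive_posts; infer_instance

def pvDiffWitness_group_consecutive_posts : (List (List (String × String))) := [[]]
def pvDiffWitnessOut_group_consecutive_posts :
    (List (List (String × String))) × (List (List (String × String))) := ([], [[]])

-- ===== CLAIM (what is proved, stated in full; the proofs are below) =====
def Claim_unchanged_group_consecutive_posts : Prop := ∀ (posts : List (List (String × String))), Dom_group_consecutive_posts posts → Pre_group_consecutive_posts posts → Spec_group_consecutive_posts posts (group_consecutive_posts posts)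
def Claim_changed_group_consecutive_posts : Prop := Dom_group_consecutive_posts (pvDiffWitness_group_consecutive_posts) ∧ Pre_group_consecutive_posts (pvDiffWitness_group_consecutive_posts) ∧ D_group_consecutive_posts (pvDiffWitness_group_consecutive_posts) ∧ group_consecutive_posts (pvDiffWitness_group_consecutive_posts) = pvDiffWitnessOut_group_consecutive_posts.1 ∧ group_consecutive_posts_alt (pvDiffWitness_group_consecutive_posts) = pvDiffWitnessOut_group_consecutive_posts.2 ∧ pvDiffWitnessOut_group_consecutive_posts.1 ≠ pvDiffWitnessOut_group_consecutive_posts.2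
def Claim_exact_group_consecutive_posts : Prop := ∀ (posts : List (List (String × String))), Dom_group_consecutive_posts posts → Pre_group_consecutive_posts posts → D_group_consecutive_posts posts → group_consecutive_posts posts ≠ group_consecutive_posts_alt posts

-- ===== LEMMAS AND PROOFS =====

-- "\n".join over a run extended by one message (Chars side).
theorem pv_join_snoc (sep x : List Char) (l : List (List Char)) (hl : l ≠ []) :
    PySem.Chars.join sep (l ++ [x]) = PySem.Chars.join sep l ++ sep ++ x := by
  induction l with
  | nil => cases hl rfl
  | cons a t ih =>
    cases t with
    | nil => simp [PySem.Chars.join_cons_cons, PySem.Chars.join_singleton]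
    | cons b t' =>
      have h' : b :: t' ≠ [] := by simp
      simp only [List.cons_append, PySem.Chars.join_cons_cons]
      have ih2 := ih h'
      rw [List.cons_append] at ih2
      rw [ih2]
      simp [List.append_assoc]

theorem pv_str_join_snoc (x : String) (l : List String) (hl : l ≠ []) :
    PySem.Str.join "\n" (l ++ [x]) = PySem.Str.join "\n" l ++ "\n" ++ x := by
  apply String.toList_inj.mp
  simp only [PySem.Str.toList_join, String.toList_append, List.map_append, List.map_cons,
    List.map_nil]
  exact pv_join_snoc _ _ _ (by simpa using hl)

theorem pv_finish_getD_uid (r : List (PySem.Dict String String)) :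
    (pvFinishRun r).getD "user_id" "" = (r.headD PySem.Dict.empty).getD "user_id" "" := by
  unfold pvFinishRun
  split
  · rw [PySem.Dict.getD_insert_of_ne _ _ _ (by decide : ("user_id" : String) ≠ "message")]
  · rfl

theorem pv_finish_ne_empty (r : List (PySem.Dict String String))
    (h : (r.headD PySem.Dict.empty).items ≠ []) : (pvFinishRun r).items ≠ [] := by
  unfold pvFinishRun
  split
  · rw [PySem.Dict.items_insert]
    split
    · simpa using h
    · simp
  · exact h

-- A's incremental '+=' merge applied to a finished run equals finishing the extended run.
theorem pv_merge_finish (r : List (PySem.Dict String String)) (p : PySem.Dict String String)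
    (hr : r ≠ []) :
    (pvFinishRun r).insert "message"
        ((pvFinishRun r).getD "message" "" ++ "\n" ++ p.getD "message" "") =
      pvFinishRun (r ++ [p]) := by
  obtain ⟨a, t, rfl⟩ := List.exists_cons_of_ne_nil hr
  unfold pvFinishRun
  cases t with
  | nil =>
    simp only [List.length_cons, List.length_nil, List.headD_cons,
      List.cons_append, List.nil_append, List.map_cons, List.map_nil]
    norm_num
    congr 1
    apply String.toList_inj.mp
    simp [PySem.Str.toList_join, PySem.Chars.join_cons_cons, PySem.Chars.join_singleton]
  | cons b t' =>
    simp only [List.length_cons, List.cons_append, List.headD_cons, List.map_cons, List.map_append]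
    norm_num [Nat.succ_lt_succ_iff]
    rw [PySem.Dict.insert_insert_self]
    congr 1
    rw [← List.cons_append, ← List.cons_append, pv_str_join_snoc _ _ (by simp)]

theorem pv_stepB_ne_nil (runs : List (List (PySem.Dict String String)))
    (raw : List (String × String)) : pvStepB runs raw ≠ [] := by
  unfold pvStepB
  cases h : runs.getLast? <;> simp
  split <;> simp

-- pvStepB only reads and rewrites the last run, so a prefix of runs is inert.
theorem pv_foldB_append (rest : List (List (String × String))) :
    ∀ (rs rs' : List (List (PySem.Dict String String))), rs' ≠ [] →
      rest.foldl pvStepB (rs ++ rs') = rs ++ rest.foldl pvStepB rs' := by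
  induction rest with
  | nil => intro rs rs' _; rfl
  | cons p t ih =>
    intro rs rs' h
    simp only [List.foldl_cons]
    have hstep : pvStepB (rs ++ rs') p = rs ++ pvStepB rs' p := by
      unfold pvStepB
      rw [List.getLast?_append_of_ne_nil _ h]
      cases hl : rs'.getLast? with
      | none => simp [List.getLast?_eq_none_iff.mp hl] at h
      | some r =>
        simp only
        split
        · rw [List.dropLast_append_of_ne_nil h]; simp
        · simp
    rw [hstep, ih _ _ (pv_stepB_ne_nil _ _)]

-- Main loop invariant: A's state (g, some c) with c the merged image of the current run r
-- corresponds to B having the runs so far (already flushed into g) plus the open run r.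
theorem pv_main (rest : List (List (String × String))) :
    ∀ (g : List (PySem.Dict String String)) (r : List (PySem.Dict String String))
      (c : PySem.Dict String String),
      (∀ p ∈ rest, (PySem.Dict.ofList p).items ≠ []) →
      r ≠ [] → c = pvFinishRun r → (r.headD PySem.Dict.empty).items ≠ [] →
      (match rest.foldl pvStepA (g, some c) with
        | (g', none) => g'
        | (g', some c') => if c'.items.isEmpty then g' else g' ++ [c']) =
      g ++ (rest.foldl pvStepB [r]).map pvFinishRun := by
  induction rest with
  | nil =>
    intro g r c _ hr hc hh
    subst hc
    simp [List.isEmpty_iff, pv_finish_ne_empty r hh]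
  | cons p t ih =>
    intro g r c hne hr hc hh
    have hp : (PySem.Dict.ofList p).items ≠ [] := hne p (by simp)
    have hne' : ∀ q ∈ t, (PySem.Dict.ofList q).items ≠ [] := fun q hq => hne q (by simp [hq])
    simp only [List.foldl_cons]
    by_cases huid : c.getD "user_id" "" = (PySem.Dict.ofList p).getD "user_id" ""
    · -- same user: A merges into c, B appends p to the open run r
      have hA : pvStepA (g, some c) p =
          (g, some (c.insert "message"
            (c.getD "message" "" ++ "\n" ++ (PySem.Dict.ofList p).getD "message" ""))) := by
        simp [pvStepA, huid]
      have hB : pvStepB [r] p = [r ++ [PySem.Dict.ofList p]] := by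
        have : (r.headD PySem.Dict.empty).getD "user_id" ""
            = (PySem.Dict.ofList p).getD "user_id" "" := by
          rw [← pv_finish_getD_uid r, ← hc]; exact huid
        simp [pvStepB, this, -List.headD_eq_head?_getD]
      rw [hA, hB]
      have hc' : c.insert "message"
            (c.getD "message" "" ++ "\n" ++ (PySem.Dict.ofList p).getD "message" "")
          = pvFinishRun (r ++ [PySem.Dict.ofList p]) := by
        rw [hc]; exact pv_merge_finish r _ hr
      have hh' : ((r ++ [PySem.Dict.ofList p]).headD PySem.Dict.empty).items ≠ [] := by
        obtain ⟨a, t', rfl⟩ := List.exists_cons_of_ne_nil hr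
        simpa using hh
      exact ih g (r ++ [PySem.Dict.ofList p]) _ hne' (by simp) hc' hh'
    · -- user changes: A flushes c into g and starts over at p, B opens a new singleton run
      have hcne : c.items ≠ [] := hc ▸ pv_finish_ne_empty r hh
      have hA : pvStepA (g, some c) p = (g ++ [c], some (PySem.Dict.ofList p)) := by
        simp [pvStepA, huid, List.isEmpty_iff, hcne]
      have hB : pvStepB [r] p = [r] ++ [[PySem.Dict.ofList p]] := by
        have : ¬ (r.headD PySem.Dict.empty).getD "user_id" ""
            = (PySem.Dict.ofList p).getD "user_id" "" := by
          rw [← pv_finish_getD_uid r, ← hc]; exact huid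
        simp [pvStepB, this, -List.headD_eq_head?_getD]
      rw [hA, hB, pv_foldB_append t [r] [[PySem.Dict.ofList p]] (by simp)]
      have := ih (g ++ [c]) [PySem.Dict.ofList p] (PySem.Dict.ofList p) hne'
        (by simp) (by simp [pvFinishRun]) (by simpa using hp)
      rw [this, hc]
      simp [pvFinishRun]

theorem pv_contains_items_ne (d : PySem.Dict String String)
    (h : d.contains "user_id" = true) : d.items ≠ [] := by
  intro hnil
  rw [PySem.Dict.contains_iff_mem_keys] at h
  have : d.keys = [] := by simp [PySem.Dict.keys, hnil]
  simp [this] at h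

theorem pv_ofList_items_ne (p : List (String × String)) (h : p ≠ []) :
    (PySem.Dict.ofList p).items ≠ [] := by
  intro hnil
  have hk : (PySem.Dict.ofList p).keys = [] := by simp [PySem.Dict.keys, hnil]
  rw [show PySem.Dict.ofList p = p.foldl (fun d x => d.insert x.1 x.2) PySem.Dict.empty from rfl,
    PySem.Dict.keys_foldl_insert_key (key := Prod.fst) (f := fun _ x => x.2)] at hk
  obtain ⟨a, t, rfl⟩ := List.exists_cons_of_ne_nil h
  have hm : a.1 ∈ PySem.Set.ofList ((a :: t).map Prod.fst) :=
    (PySem.Set.mem_ofList _ _).mpr (by simp)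
  have hk2 : PySem.Set.ofList ((a :: t).map Prod.fst) = [] := hk
  rw [hk2] at hm
  simp at hm

-- ===== VERDICT (by name: the statement is the Claim_ definition above) =====
theorem group_consecutive_posts_spec : Claim_unchanged_group_consecutive_posts := by
  intro posts _ hpre hD
  unfold group_consecutive_posts group_consecutive_posts_alt
  rw [PySem.List.foldl_append_singleton_eq_map]
  match posts with
  | [] => rfl
  | [p] =>
    have hp : p ≠ [] := fun h => hD (by simp [D_group_consecutive_posts, h])
    simp [pvStepA, pvStepB, pvFinishRun, List.isEmpty_iff, pv_ofList_items_ne p hp]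
  | p :: q :: t =>
    have hne : ∀ x ∈ p :: q :: t, (PySem.Dict.ofList x).items ≠ [] :=
      fun x hx => pv_contains_items_ne _ (hpre.1 (by simp) x hx)
    have h1 : (p :: q :: t).foldl pvStepA ([], none)
        = (q :: t).foldl pvStepA ([], some (PySem.Dict.ofList p)) := by
      rw [List.foldl_cons]; simp [pvStepA]
    have h2 : (p :: q :: t).foldl pvStepB [] = (q :: t).foldl pvStepB [[PySem.Dict.ofList p]] := by
      rw [List.foldl_cons]; simp [pvStepB]
    rw [h1, h2]
    have := pv_main (q :: t) [] [PySem.Dict.ofList p] (PySem.Dict.ofList p)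
      (fun x hx => hne x (by simp [List.mem_cons] at hx ⊢; tauto)) (by simp) (by simp [pvFinishRun])
      (by simpa using hne p (by simp))
    simp only [List.nil_append] at this
    rw [this, List.nil_append]

theorem group_consecutive_posts_changed : Claim_changed_group_consecutive_posts := by
  unfold Claim_changed_group_consecutive_posts; decide

theorem group_consecutive_posts_tight : Claim_exact_group_consecutive_posts := by
  intro posts _ _ hD
  rw [hD]
  decide
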